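-- pv_equiv track=rewrite | github.com/aayush0327/Logistic-ERP-System | services/company/src/security/permissions.py | get_readable_permissions
-- ===== SOURCE A (Python) =====
-- from typing import List, Dict, Set, Optional
--
-- def get_readable_permissions(permissions: List[str]) -> Dict[str, List[str]]:
--     """
--     Group permissions by resource for better readability
--
--     Args:
--         permissions: List of permission strings
--
--     Returns:
--         Dictionary with resource names as keys and permission lists as values
--     """
--     grouped = {
--         "branches": [],
--         "customers": [],
--         "vehicles": [],
--         "products": [],
--         "product_categories": [],
--         "service_zones": [],
--         "pricing_rules": [],
--         "reports": [],
--         "company": [],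
--         "other": []
--     }
--
--     for perm in permissions:
--         if perm.startswith("branches:"):
--             grouped["branches"].append(perm)
--         elif perm.startswith("customers:"):
--             grouped["customers"].append(perm)
--         elif perm.startswith("vehicles:"):
--             grouped["vehicles"].append(perm)
--         elif perm.startswith("products:"):
--             grouped["products"].append(perm)
--         elif perm.startswith("product_categories:"):
--             grouped["product_categories"].append(perm)
--         elif perm.startswith("service_zones:"):
--             grouped["service_zones"].append(perm)
--         elif perm.startswith("pricing_rules:"):
--             grouped["pricing_rules"].append(perm)
--         elif perm.startswith("company_reports:"):
--             grouped["reports"].append(perm)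
--         elif perm.startswith("company:"):
--             grouped["company"].append(perm)
--         else:
--             grouped["other"].append(perm)
--
--     # Remove empty groups
--     return {k: v for k, v in grouped.items() if v}
-- ===== SOURCE B (Python) =====
-- # Alternative decomposition: staged per-group filter passes over the list instead of
-- # A's single pass dispatching each item through a nine-branch if-chain.
-- _SPECS = [("branches", "branches:"), ("customers", "customers:"), ("vehicles", "vehicles:"),
--           ("products", "products:"), ("product_categories", "product_categories:"),
--           ("service_zones", "service_zones:"), ("pricing_rules", "pricing_rules:"),
--           ("reports", "company_reports:"), ("company", "company:")]
-- # Correct because the nine prefixes are mutually exclusive (each is "word:" with a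
-- # colon-free word, and the text before a string's first colon matches at most one word),
-- # so per-group filtering selects exactly the items A's chain routes to that group,
-- # in the same relative order.
--
-- def get_readable_permissions(permissions):
--     result = {}
--     for group, prefix in _SPECS:
--         bucket = [p for p in permissions if p.startswith(prefix)]
--         if bucket:
--             result[group] = bucket
--     other = [p for p in permissions if not any(p.startswith(prefix) for _, prefix in _SPECS)]
--     if other:
--         result["other"] = other
--     return result
-- ===== Notes on version B (the rewrite author's own statement) =====
-- stated objective: alternative
-- what changed: Instead of one pass dispatching each permission through a nine-branch startswith if-chain into pre-built buckets, B makes staged passes: one filter scan of the list per group (inserting only non-empty buckets) plus a residual scan for items matching no prefix; correct since the nine prefixes are mutually exclusive.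
import Mathlib
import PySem

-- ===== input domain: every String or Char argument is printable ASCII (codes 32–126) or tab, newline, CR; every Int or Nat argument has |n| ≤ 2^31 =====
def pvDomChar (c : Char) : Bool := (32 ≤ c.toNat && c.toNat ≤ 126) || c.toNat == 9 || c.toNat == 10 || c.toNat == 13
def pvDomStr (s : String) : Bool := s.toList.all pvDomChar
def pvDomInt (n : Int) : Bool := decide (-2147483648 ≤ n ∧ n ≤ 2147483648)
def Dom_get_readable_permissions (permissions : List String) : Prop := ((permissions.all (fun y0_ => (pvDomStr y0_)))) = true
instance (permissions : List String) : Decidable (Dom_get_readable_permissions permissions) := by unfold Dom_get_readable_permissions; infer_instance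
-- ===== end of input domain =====

-- B groups by staged per-group filter passes (one scan per group plus a residual scan)
-- instead of A's single pass routing each item through a nine-branch if-chain
-- (objective: alternative); equality of the RETURN value is proved below.

-- ===== PORT A =====
-- the initial `grouped` dict literal of A
def pvInitA : PySem.Dict String (List String) := PySem.Dict.ofList
  [("branches", []), ("customers", []), ("vehicles", []), ("products", []),
   ("product_categories", []), ("service_zones", []), ("pricing_rules", []),
   ("reports", []), ("company", []), ("other", [])]

-- the body of A's `for perm in permissions` loop (the 9-branch elif chain)
def pvStepA (d : PySem.Dict String (List String)) (perm : String) : PySem.Dict String (List String) :=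
  if PySem.Str.startswith perm "branches:" then d.modify "branches" [] (· ++ [perm])
  else if PySem.Str.startswith perm "customers:" then d.modify "customers" [] (· ++ [perm])
  else if PySem.Str.startswith perm "vehicles:" then d.modify "vehicles" [] (· ++ [perm])
  else if PySem.Str.startswith perm "products:" then d.modify "products" [] (· ++ [perm])
  else if PySem.Str.startswith perm "product_categories:" then d.modify "product_categories" [] (· ++ [perm])
  else if PySem.Str.startswith perm "service_zones:" then d.modify "service_zones" [] (· ++ [perm])
  else if PySem.Str.startswith perm "pricing_rules:" then d.modify "pricing_rules" [] (· ++ [perm])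
  else if PySem.Str.startswith perm "company_reports:" then d.modify "reports" [] (· ++ [perm])
  else if PySem.Str.startswith perm "company:" then d.modify "company" [] (· ++ [perm])
  else d.modify "other" [] (· ++ [perm])

def get_readable_permissions (permissions : List String) : List (String × List String) :=
  ((permissions.foldl pvStepA pvInitA).items).filter (fun kv => !kv.2.isEmpty)

-- ===== PORT B =====
-- Source B's _SPECS table: (group, prefix), in order
def pvSpecs : List (String × String) :=
  [("branches", "branches:"), ("customers", "customers:"), ("vehicles", "vehicles:"),
   ("products", "products:"), ("product_categories", "product_categories:"),
   ("service_zones", "service_zones:"), ("pricing_rules", "pricing_rules:"),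
   ("reports", "company_reports:"), ("company", "company:")]

def get_readable_permissions_alt (permissions : List String) : List (String × List String) :=
  -- for group, prefix in _SPECS: bucket = [p for p in permissions if p.startswith(prefix)]; if bucket: result[group] = bucket
  let result := pvSpecs.foldl
    (fun res sp =>
      let bucket := permissions.filter (fun p => PySem.Str.startswith p sp.2)
      if bucket.isEmpty then res else res.insert sp.1 bucket)
    PySem.Dict.empty
  -- other = [p for p in permissions if not any(p.startswith(prefix) for _, prefix in _SPECS)]
  let other := permissions.filter (fun p => !(pvSpecs.any (fun sp => PySem.Str.startswith p sp.2)))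
  -- if other: result["other"] = other
  (if other.isEmpty then result else result.insert "other" other).items

-- ===== PRECONDITION & SPEC =====
def Spec_get_readable_permissions (permissions : List String) (out : List (String × List String)) : Prop := out = get_readable_permissions_alt permissions
instance (permissions : List String) (out : List (String × List String)) : Decidable (Spec_get_readable_permissions permissions out) := by unfold Spec_get_readable_permissions; infer_instance

-- ===== CLAIM (what is proved, stated in full; the proofs are below) =====
def Claim_equal_get_readable_permissions : Prop := ∀ (permissions : List String), Dom_get_readable_permissions permissions → Spec_get_readable_permissions permissions (get_readable_permissions permissions)

-- ===== LEMMAS AND PROOFS =====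

-- A's if-chain as a classification function (proof helper only)
def pvClassify (perm : String) : String :=
  if PySem.Str.startswith perm "branches:" then "branches"
  else if PySem.Str.startswith perm "customers:" then "customers"
  else if PySem.Str.startswith perm "vehicles:" then "vehicles"
  else if PySem.Str.startswith perm "products:" then "products"
  else if PySem.Str.startswith perm "product_categories:" then "product_categories"
  else if PySem.Str.startswith perm "service_zones:" then "service_zones"
  else if PySem.Str.startswith perm "pricing_rules:" then "pricing_rules"
  else if PySem.Str.startswith perm "company_reports:" then "reports"
  else if PySem.Str.startswith perm "company:" then "company"
  else "other"

lemma pv_stepA_eq (d : PySem.Dict String (List String)) (perm : String) :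
    pvStepA d perm = d.modify (pvClassify perm) [] (· ++ [perm]) := by
  unfold pvStepA pvClassify
  split_ifs <;> rfl

lemma pv_classify_mem (perm : String) :
    pvClassify perm ∈ ["branches", "customers", "vehicles", "products", "product_categories",
      "service_zones", "pricing_rules", "reports", "company", "other"] := by
  unfold pvClassify
  split_ifs <;> simp

-- `s.startswith(p + ":")` for a colon-free p says: s contains a ':' and the text before
-- the first ':' is exactly p.
lemma pv_sw_colon_iff (p s : List Char) (hp : ':' ∉ p) :
    (p ++ [':']) <+: s ↔ (':' ∈ s ∧ s.takeWhile (· ≠ ':') = p) := by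
  induction p generalizing s with
  | nil =>
    cases s with
    | nil => simp
    | cons c t =>
      by_cases hc : c = ':'
      · subst hc; simp [List.takeWhile]
      · simp [List.cons_prefix_cons, List.takeWhile, hc, Ne.symm hc]
  | cons a p' ih =>
    have ha : a ≠ ':' := fun h => hp (h ▸ List.mem_cons_self)
    have hp' : ':' ∉ p' := fun h => hp (List.mem_cons_of_mem _ h)
    cases s with
    | nil => simp
    | cons c t =>
      rw [List.cons_append, List.cons_prefix_cons]
      by_cases hc : a = c
      · subst hc
        rw [List.takeWhile_cons_of_pos (by simp [ha]), List.mem_cons, ih t hp']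
        constructor
        · rintro ⟨-, h1, h2⟩; exact ⟨Or.inr h1, by rw [h2]⟩
        · rintro ⟨h1, h2⟩
          rcases h1 with h1 | h1
          · exact absurd h1.symm ha
          · exact ⟨rfl, h1, by injection h2⟩
      · constructor
        · rintro ⟨h, -⟩; exact absurd h hc
        · rintro ⟨h1, h2⟩
          by_cases hcc : c = ':'
          · rw [List.takeWhile_cons_of_neg (by simp [hcc])] at h2
            exact absurd h2.symm (List.cons_ne_nil a p')
          · rw [List.takeWhile_cons_of_pos (by simp [hcc])] at h2
            have : c = a := by injection h2
            exact absurd this.symm hc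

-- the Bool form of the same fact, at String level, for a literal prefix w ++ ":"
lemma pv_sw' (w pre : String) (hw : ':' ∉ w.toList) (hpre : pre.toList = w.toList ++ [':'])
    (p : String) :
    PySem.Str.startswith p pre =
      (if ':' ∈ p.toList then decide (p.toList.takeWhile (· ≠ ':') = w.toList) else false) := by
  have hbase : PySem.Str.startswith p pre = PySem.Chars.startswith p.toList (w.toList ++ [':']) := by
    simp [PySem.Str.startswith, hpre]
  have h := (PySem.Chars.startswith_iff p.toList (w.toList ++ [':'])).trans
    (pv_sw_colon_iff w.toList p.toList hw)
  by_cases hc : ':' ∈ p.toList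
  · rw [hbase, if_pos hc]
    by_cases hq : p.toList.takeWhile (· ≠ ':') = w.toList
    · simp only [hq, decide_true]; exact h.mpr ⟨hc, hq⟩
    · simp only [hq, decide_false]
      rcases hsw : PySem.Chars.startswith p.toList (w.toList ++ [':']) with _ | _
      · rfl
      · exact absurd (h.mp hsw).2 hq
  · rw [hbase, if_neg hc]
    rcases hsw : PySem.Chars.startswith p.toList (w.toList ++ [':']) with _ | _
    · rfl
    · exact absurd (((h.mp hsw)).1) hc

-- A's classification, rewritten on the text before the first colon
lemma pv_classify_eq (p : String) :
    pvClassify p =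
      (if ':' ∈ p.toList then
        (if p.toList.takeWhile (· ≠ ':') = "branches".toList then "branches"
         else if p.toList.takeWhile (· ≠ ':') = "customers".toList then "customers"
         else if p.toList.takeWhile (· ≠ ':') = "vehicles".toList then "vehicles"
         else if p.toList.takeWhile (· ≠ ':') = "products".toList then "products"
         else if p.toList.takeWhile (· ≠ ':') = "product_categories".toList then "product_categories"
         else if p.toList.takeWhile (· ≠ ':') = "service_zones".toList then "service_zones"
         else if p.toList.takeWhile (· ≠ ':') = "pricing_rules".toList then "pricing_rules"
         else if p.toList.takeWhile (· ≠ ':') = "company_reports".toList then "reports"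
         else if p.toList.takeWhile (· ≠ ':') = "company".toList then "company"
         else "other")
       else "other") := by
  unfold pvClassify
  rw [pv_sw' "branches" "branches:" (by decide) (by decide) p,
      pv_sw' "customers" "customers:" (by decide) (by decide) p,
      pv_sw' "vehicles" "vehicles:" (by decide) (by decide) p,
      pv_sw' "products" "products:" (by decide) (by decide) p,
      pv_sw' "product_categories" "product_categories:" (by decide) (by decide) p,
      pv_sw' "service_zones" "service_zones:" (by decide) (by decide) p,
      pv_sw' "pricing_rules" "pricing_rules:" (by decide) (by decide) p,
      pv_sw' "company_reports" "company_reports:" (by decide) (by decide) p,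
      pv_sw' "company" "company:" (by decide) (by decide) p]
  by_cases hc : ':' ∈ p.toList <;> simp [hc]

-- pointwise: A's classification names group k exactly when B's prefix test for k fires
lemma pv_grp (w pre k : String) (hw : ':' ∉ w.toList) (hpre : pre.toList = w.toList ++ [':'])
    (hko : ("other" == k) = false)
    (hwk : ∀ q : List Char,
      ((if q = "branches".toList then "branches"
        else if q = "customers".toList then "customers"
        else if q = "vehicles".toList then "vehicles"
        else if q = "products".toList then "products"
        else if q = "product_categories".toList then "product_categories"
        else if q = "service_zones".toList then "service_zones"
        else if q = "pricing_rules".toList then "pricing_rules"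
        else if q = "company_reports".toList then "reports"
        else if q = "company".toList then "company"
        else "other") == k) = decide (q = w.toList))
    (p : String) :
    (pvClassify p == k) = PySem.Str.startswith p pre := by
  rw [pv_classify_eq, pv_sw' w pre hw hpre p]
  by_cases hc : ':' ∈ p.toList
  · rw [if_pos hc, if_pos hc]; exact hwk _
  · rw [if_neg hc, if_neg hc]; exact hko

lemma pv_hwk_branches : ∀ q : List Char,
    ((if q = "branches".toList then "branches"
        else if q = "customers".toList then "customers"
        else if q = "vehicles".toList then "vehicles"
        else if q = "products".toList then "products"
        else if q = "product_categories".toList then "product_categories"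
        else if q = "service_zones".toList then "service_zones"
        else if q = "pricing_rules".toList then "pricing_rules"
        else if q = "company_reports".toList then "reports"
        else if q = "company".toList then "company"
        else "other") == "branches") = decide (q = "branches".toList) := by
  intro q
  split_ifs with h1 h2 h3 h4 h5 h6 h7 h8 h9
  · subst h1; decide
  · subst h2; decide
  · subst h3; decide
  · subst h4; decide
  · subst h5; decide
  · subst h6; decide
  · subst h7; decide
  · subst h8; decide
  · subst h9; decide
  · rw [decide_eq_false h1]; decide

lemma pv_hwk_customers : ∀ q : List Char,
    ((if q = "branches".toList then "branches"
        else if q = "customers".toList then "customers"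
        else if q = "vehicles".toList then "vehicles"
        else if q = "products".toList then "products"
        else if q = "product_categories".toList then "product_categories"
        else if q = "service_zones".toList then "service_zones"
        else if q = "pricing_rules".toList then "pricing_rules"
        else if q = "company_reports".toList then "reports"
        else if q = "company".toList then "company"
        else "other") == "customers") = decide (q = "customers".toList) := by
  intro q
  split_ifs with h1 h2 h3 h4 h5 h6 h7 h8 h9
  · subst h1; decide
  · subst h2; decide
  · subst h3; decide
  · subst h4; decide
  · subst h5; decide
  · subst h6; decide
  · subst h7; decide
  · subst h8; decide
  · subst h9; decide
  · rw [decide_eq_false h2]; decide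

lemma pv_hwk_vehicles : ∀ q : List Char,
    ((if q = "branches".toList then "branches"
        else if q = "customers".toList then "customers"
        else if q = "vehicles".toList then "vehicles"
        else if q = "products".toList then "products"
        else if q = "product_categories".toList then "product_categories"
        else if q = "service_zones".toList then "service_zones"
        else if q = "pricing_rules".toList then "pricing_rules"
        else if q = "company_reports".toList then "reports"
        else if q = "company".toList then "company"
        else "other") == "vehicles") = decide (q = "vehicles".toList) := by
  intro q
  split_ifs with h1 h2 h3 h4 h5 h6 h7 h8 h9
  · subst h1; decide
  · subst h2; decide
  · subst h3; decide
  · subst h4; decide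
  · subst h5; decide
  · subst h6; decide
  · subst h7; decide
  · subst h8; decide
  · subst h9; decide
  · rw [decide_eq_false h3]; decide

lemma pv_hwk_products : ∀ q : List Char,
    ((if q = "branches".toList then "branches"
        else if q = "customers".toList then "customers"
        else if q = "vehicles".toList then "vehicles"
        else if q = "products".toList then "products"
        else if q = "product_categories".toList then "product_categories"
        else if q = "service_zones".toList then "service_zones"
        else if q = "pricing_rules".toList then "pricing_rules"
        else if q = "company_reports".toList then "reports"
        else if q = "company".toList then "company"
        else "other") == "products") = decide (q = "products".toList) := by
  intro q
  split_ifs with h1 h2 h3 h4 h5 h6 h7 h8 h9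
  · subst h1; decide
  · subst h2; decide
  · subst h3; decide
  · subst h4; decide
  · subst h5; decide
  · subst h6; decide
  · subst h7; decide
  · subst h8; decide
  · subst h9; decide
  · rw [decide_eq_false h4]; decide

lemma pv_hwk_product_categories : ∀ q : List Char,
    ((if q = "branches".toList then "branches"
        else if q = "customers".toList then "customers"
        else if q = "vehicles".toList then "vehicles"
        else if q = "products".toList then "products"
        else if q = "product_categories".toList then "product_categories"
        else if q = "service_zones".toList then "service_zones"
        else if q = "pricing_rules".toList then "pricing_rules"
        else if q = "company_reports".toList then "reports"
        else if q = "company".toList then "company"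
        else "other") == "product_categories") = decide (q = "product_categories".toList) := by
  intro q
  split_ifs with h1 h2 h3 h4 h5 h6 h7 h8 h9
  · subst h1; decide
  · subst h2; decide
  · subst h3; decide
  · subst h4; decide
  · subst h5; decide
  · subst h6; decide
  · subst h7; decide
  · subst h8; decide
  · subst h9; decide
  · rw [decide_eq_false h5]; decide

lemma pv_hwk_service_zones : ∀ q : List Char,
    ((if q = "branches".toList then "branches"
        else if q = "customers".toList then "customers"
        else if q = "vehicles".toList then "vehicles"
        else if q = "products".toList then "products"
        else if q = "product_categories".toList then "product_categories"
        else if q = "service_zones".toList then "service_zones"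
        else if q = "pricing_rules".toList then "pricing_rules"
        else if q = "company_reports".toList then "reports"
        else if q = "company".toList then "company"
        else "other") == "service_zones") = decide (q = "service_zones".toList) := by
  intro q
  split_ifs with h1 h2 h3 h4 h5 h6 h7 h8 h9
  · subst h1; decide
  · subst h2; decide
  · subst h3; decide
  · subst h4; decide
  · subst h5; decide
  · subst h6; decide
  · subst h7; decide
  · subst h8; decide
  · subst h9; decide
  · rw [decide_eq_false h6]; decide

lemma pv_hwk_pricing_rules : ∀ q : List Char,
    ((if q = "branches".toList then "branches"
        else if q = "customers".toList then "customers"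
        else if q = "vehicles".toList then "vehicles"
        else if q = "products".toList then "products"
        else if q = "product_categories".toList then "product_categories"
        else if q = "service_zones".toList then "service_zones"
        else if q = "pricing_rules".toList then "pricing_rules"
        else if q = "company_reports".toList then "reports"
        else if q = "company".toList then "company"
        else "other") == "pricing_rules") = decide (q = "pricing_rules".toList) := by
  intro q
  split_ifs with h1 h2 h3 h4 h5 h6 h7 h8 h9
  · subst h1; decide
  · subst h2; decide
  · subst h3; decide
  · subst h4; decide
  · subst h5; decide
  · subst h6; decide
  · subst h7; decide
  · subst h8; decide
  · subst h9; decide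
  · rw [decide_eq_false h7]; decide

lemma pv_hwk_reports : ∀ q : List Char,
    ((if q = "branches".toList then "branches"
        else if q = "customers".toList then "customers"
        else if q = "vehicles".toList then "vehicles"
        else if q = "products".toList then "products"
        else if q = "product_categories".toList then "product_categories"
        else if q = "service_zones".toList then "service_zones"
        else if q = "pricing_rules".toList then "pricing_rules"
        else if q = "company_reports".toList then "reports"
        else if q = "company".toList then "company"
        else "other") == "reports") = decide (q = "company_reports".toList) := by
  intro q
  split_ifs with h1 h2 h3 h4 h5 h6 h7 h8 h9
  · subst h1; decide
  · subst h2; decide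
  · subst h3; decide
  · subst h4; decide
  · subst h5; decide
  · subst h6; decide
  · subst h7; decide
  · subst h8; decide
  · subst h9; decide
  · rw [decide_eq_false h8]; decide

lemma pv_hwk_company : ∀ q : List Char,
    ((if q = "branches".toList then "branches"
        else if q = "customers".toList then "customers"
        else if q = "vehicles".toList then "vehicles"
        else if q = "products".toList then "products"
        else if q = "product_categories".toList then "product_categories"
        else if q = "service_zones".toList then "service_zones"
        else if q = "pricing_rules".toList then "pricing_rules"
        else if q = "company_reports".toList then "reports"
        else if q = "company".toList then "company"
        else "other") == "company") = decide (q = "company".toList) := by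
  intro q
  split_ifs with h1 h2 h3 h4 h5 h6 h7 h8 h9
  · subst h1; decide
  · subst h2; decide
  · subst h3; decide
  · subst h4; decide
  · subst h5; decide
  · subst h6; decide
  · subst h7; decide
  · subst h8; decide
  · subst h9; decide
  · rw [decide_eq_false h9]; decide

-- pointwise: A classifies to "other" exactly when no prefix of B's table matches
lemma pv_other (p : String) :
    (pvClassify p == "other") =
      !(pvSpecs.any (fun sp => PySem.Str.startswith p sp.2)) := by
  simp only [pvSpecs, List.any_cons, List.any_nil]
  rw [pv_classify_eq,
      pv_sw' "branches" "branches:" (by decide) (by decide) p,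
      pv_sw' "customers" "customers:" (by decide) (by decide) p,
      pv_sw' "vehicles" "vehicles:" (by decide) (by decide) p,
      pv_sw' "products" "products:" (by decide) (by decide) p,
      pv_sw' "product_categories" "product_categories:" (by decide) (by decide) p,
      pv_sw' "service_zones" "service_zones:" (by decide) (by decide) p,
      pv_sw' "pricing_rules" "pricing_rules:" (by decide) (by decide) p,
      pv_sw' "company_reports" "company_reports:" (by decide) (by decide) p,
      pv_sw' "company" "company:" (by decide) (by decide) p]
  by_cases hc : ':' ∈ p.toList
  · simp only [if_pos hc]
    split_ifs with h1 h2 h3 h4 h5 h6 h7 h8 h9 <;> simp_all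
  · simp [hc]

-- PySem.Set.update adds nothing when every element is already present
lemma pv_set_update_of_mem {s : List String} {xs : List String}
    (h : ∀ x ∈ xs, x ∈ s) : PySem.Set.update s xs = s := by
  induction xs generalizing s with
  | nil => rfl
  | cons x xs ih =>
    have hx : PySem.Set.add s x = s := by
      simp [PySem.Set.add, PySem.Set.contains, h x List.mem_cons_self]
    calc PySem.Set.update s (x :: xs)
        = PySem.Set.update (PySem.Set.add s x) xs := rfl
      _ = s := by rw [hx]; exact ih (fun y hy => h y (List.mem_cons_of_mem _ hy))

-- a conditional-insert loop over fresh distinct keys appends exactly the non-empty pairs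
lemma pv_condInsert_items (L : List (String × List String)) (d : PySem.Dict String (List String))
    (hnd : d.keys.Nodup) (hfresh : ∀ kv ∈ L, d.contains kv.1 = false)
    (hL : (L.map Prod.fst).Nodup) :
    (L.foldl (fun res kv => if kv.2.isEmpty then res else res.insert kv.1 kv.2) d).items
      = d.items ++ L.filter (fun kv => !kv.2.isEmpty) := by
  induction L generalizing d with
  | nil => simp
  | cons kv L ih =>
    simp only [List.map_cons, List.nodup_cons] at hL
    rcases he : kv.2.isEmpty with _ | _
    · rw [List.foldl_cons, if_neg (by simp [he]),
        ih (d.insert kv.1 kv.2)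
          (PySem.Dict.nodup_keys_insert d kv.1 kv.2 hnd)
          (fun x hx => by
            rw [PySem.Dict.contains_insert]
            have hne : x.1 ≠ kv.1 := fun h => hL.1 (h ▸ List.mem_map_of_mem hx)
            simp [hne, hfresh x (List.mem_cons_of_mem _ hx)])
          hL.2,
        PySem.Dict.items_insert_of_not_contains d kv.2 (hfresh kv List.mem_cons_self),
        List.filter_cons, if_pos (by simp [he])]
      simp
    · rw [List.foldl_cons, if_pos (by simp [he]),
        ih d hnd (fun x hx => hfresh x (List.mem_cons_of_mem _ hx)) hL.2,
        List.filter_cons, if_neg (by simp [he])]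

-- ===== VERDICT (by name: the statement is the Claim_ definition above) =====
set_option maxHeartbeats 1000000 in
theorem get_readable_permissions_spec : Claim_equal_get_readable_permissions := by
  intro permissions _
  unfold Spec_get_readable_permissions
  -- A's side: the final dict's items are the ten buckets in their fixed order,
  -- bucket k holding the permissions A's chain classifies to k
  have hA : get_readable_permissions permissions =
      ([("branches", permissions.filter (fun p => pvClassify p == "branches")),
        ("customers", permissions.filter (fun p => pvClassify p == "customers")),
        ("vehicles", permissions.filter (fun p => pvClassify p == "vehicles")),
        ("products", permissions.filter (fun p => pvClassify p == "products")),
        ("product_categories", permissions.filter (fun p => pvClassify p == "product_categories")),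
        ("service_zones", permissions.filter (fun p => pvClassify p == "service_zones")),
        ("pricing_rules", permissions.filter (fun p => pvClassify p == "pricing_rules")),
        ("reports", permissions.filter (fun p => pvClassify p == "reports")),
        ("company", permissions.filter (fun p => pvClassify p == "company")),
        ("other", permissions.filter (fun p => pvClassify p == "other"))]).filter
          (fun kv => !kv.2.isEmpty) := by
    unfold get_readable_permissions
    have hstep : permissions.foldl pvStepA pvInitA =
        permissions.foldl (fun d p => d.modify (pvClassify p) [] (· ++ [p])) pvInitA := by
      congr 1
      funext d p
      exact pv_stepA_eq d p
    have hpair : permissions.foldl (fun d p => d.modify (pvClassify p) [] (· ++ [p])) pvInitA =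
        (permissions.map (fun p => (pvClassify p, p))).foldl
          (fun d q => d.modify q.1 [] (· ++ [q.2])) pvInitA := by
      rw [List.foldl_map]
    set dF := (permissions.map (fun p => (pvClassify p, p))).foldl
      (fun d q => d.modify q.1 [] (· ++ [q.2])) pvInitA with hdF
    rw [hstep, hpair]
    have hkeys : dF.keys = ["branches", "customers", "vehicles", "products",
        "product_categories", "service_zones", "pricing_rules", "reports", "company", "other"] := by
      rw [hdF, List.foldl_map,
        PySem.Dict.keys_foldl_modify_key permissions pvClassify [] (fun _ p => (· ++ [p])) pvInitA]
      exact pv_set_update_of_mem (fun x hx => by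
        rcases List.mem_map.mp hx with ⟨p, -, rfl⟩
        exact pv_classify_mem p)
    have hnd : dF.keys.Nodup := by rw [hkeys]; decide
    have hgetD : ∀ k : String, dF.getD k [] =
        pvInitA.getD k [] ++ permissions.filter (fun p => pvClassify p == k) := by
      intro k
      rw [hdF, PySem.Dict.getD_foldl_modify_append]
      congr 1
      rw [List.filter_map, List.map_map,
        show ((fun (x : String × String) => x.2) ∘ fun p => (pvClassify p, p)) = fun p => p from rfl,
        List.map_id']
      exact List.filter_congr (fun x _ => rfl)
    rw [PySem.Dict.items_eq_map_keys dF hnd [], hkeys]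
    simp only [List.map_cons, List.map_nil, hgetD,
      show pvInitA.getD "branches" ([] : List String) = [] from rfl,
      show pvInitA.getD "customers" ([] : List String) = [] from rfl,
      show pvInitA.getD "vehicles" ([] : List String) = [] from rfl,
      show pvInitA.getD "products" ([] : List String) = [] from rfl,
      show pvInitA.getD "product_categories" ([] : List String) = [] from rfl,
      show pvInitA.getD "service_zones" ([] : List String) = [] from rfl,
      show pvInitA.getD "pricing_rules" ([] : List String) = [] from rfl,
      show pvInitA.getD "reports" ([] : List String) = [] from rfl,
      show pvInitA.getD "company" ([] : List String) = [] from rfl,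
      show pvInitA.getD "other" ([] : List String) = [] from rfl,
      List.nil_append]
  -- B's side: the conditional-insert passes append exactly the non-empty buckets
  have hB : get_readable_permissions_alt permissions =
      ([("branches", permissions.filter (fun p => PySem.Str.startswith p "branches:")),
        ("customers", permissions.filter (fun p => PySem.Str.startswith p "customers:")),
        ("vehicles", permissions.filter (fun p => PySem.Str.startswith p "vehicles:")),
        ("products", permissions.filter (fun p => PySem.Str.startswith p "products:")),
        ("product_categories", permissions.filter (fun p => PySem.Str.startswith p "product_categories:")),
        ("service_zones", permissions.filter (fun p => PySem.Str.startswith p "service_zones:")),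
        ("pricing_rules", permissions.filter (fun p => PySem.Str.startswith p "pricing_rules:")),
        ("reports", permissions.filter (fun p => PySem.Str.startswith p "company_reports:")),
        ("company", permissions.filter (fun p => PySem.Str.startswith p "company:")),
        ("other", permissions.filter (fun p => !(pvSpecs.any (fun sp => PySem.Str.startswith p sp.2))))]).filter
          (fun kv => !kv.2.isEmpty) := by
    have hfold : get_readable_permissions_alt permissions =
        ((pvSpecs.map (fun sp => (sp.1, permissions.filter (fun p => PySem.Str.startswith p sp.2)))
          ++ [("other", permissions.filter
                (fun p => !(pvSpecs.any (fun sp => PySem.Str.startswith p sp.2))))]).foldl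
          (fun res kv => if kv.2.isEmpty then res else res.insert kv.1 kv.2)
          PySem.Dict.empty).items := by
      unfold get_readable_permissions_alt
      rw [List.foldl_append, List.foldl_map]
      rfl
    rw [hfold, pv_condInsert_items _ PySem.Dict.empty (by decide)
      (fun kv _ => PySem.Dict.contains_empty kv.1) (by simp only [pvSpecs, List.map_append, List.map_cons, List.map_nil]; decide)]
    simp only [pvSpecs, List.map_cons, List.map_nil]
    rfl
  -- the ten buckets coincide pointwise
  rw [hA, hB,
    List.filter_congr (fun x _ =>
      pv_grp "branches" "branches:" "branches" (by decide) (by decide) (by decide) pv_hwk_branches x),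
    List.filter_congr (fun x _ =>
      pv_grp "customers" "customers:" "customers" (by decide) (by decide) (by decide) pv_hwk_customers x),
    List.filter_congr (fun x _ =>
      pv_grp "vehicles" "vehicles:" "vehicles" (by decide) (by decide) (by decide) pv_hwk_vehicles x),
    List.filter_congr (fun x _ =>
      pv_grp "products" "products:" "products" (by decide) (by decide) (by decide) pv_hwk_products x),
    List.filter_congr (fun x _ =>
      pv_grp "product_categories" "product_categories:" "product_categories" (by decide) (by decide) (by decide) pv_hwk_product_categories x),
    List.filter_congr (fun x _ =>
      pv_grp "service_zones" "service_zones:" "service_zones" (by decide) (by decide) (by decide) pv_hwk_service_zones x),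
    List.filter_congr (fun x _ =>
      pv_grp "pricing_rules" "pricing_rules:" "pricing_rules" (by decide) (by decide) (by decide) pv_hwk_pricing_rules x),
    List.filter_congr (fun x _ =>
      pv_grp "company_reports" "company_reports:" "reports" (by decide) (by decide) (by decide) pv_hwk_reports x),
    List.filter_congr (fun x _ =>
      pv_grp "company" "company:" "company" (by decide) (by decide) (by decide) pv_hwk_company x),
    List.filter_congr (fun x _ => pv_other x)]
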